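-- pv_equiv track=rewrite | github.com/Trejoivan/My-Algo-Problems-and-solutions | gridTraversale/gridTraversale.py | solution
-- ===== SOURCE A (Python) =====
-- def solution(n, a):
--     result = [0 for num in range(len(a))]
--
--     if len(a) == 1:
--         return a
--
--     if len(a) == 2:
--         result[0] = a[0] + a[1]
--         result[1] = a[0] + a[1]
--
--     for idx, i in enumerate(a):
--
--         if idx > 0 and idx < len(a) - 1:
--             result[idx] += a[idx - 1] + a[idx] + a[idx + 1]
--
--         elif idx == len(a) - 1:
--             result[idx] = a[idx] + a[idx - 1]
--
--         else:
--             result[idx] = a[idx + 1] + a[idx]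
--
--     return result
-- ===== SOURCE B (Python) =====
-- def solution(n, a):
--     # prefix-sum table: prefix[k] = a[0] + ... + a[k-1]
--     prefix = [0]
--     total = 0
--     for x in a:
--         total += x
--         prefix.append(total)
--     m = len(a)
--     return [prefix[min(i + 2, m)] - prefix[max(i - 1, 0)] for i in range(m)]
-- ===== Notes on version B (the rewrite author's own statement) =====
-- stated objective: simpler
-- what changed: Replaces A's three explicit boundary branches and in-place accumulation over an enumerate loop with a one-pass prefix-sum table followed by a uniform range-difference comprehension result[i] = P[min(i+2,m)] - P[max(i-1,0)].
import Mathlib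
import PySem

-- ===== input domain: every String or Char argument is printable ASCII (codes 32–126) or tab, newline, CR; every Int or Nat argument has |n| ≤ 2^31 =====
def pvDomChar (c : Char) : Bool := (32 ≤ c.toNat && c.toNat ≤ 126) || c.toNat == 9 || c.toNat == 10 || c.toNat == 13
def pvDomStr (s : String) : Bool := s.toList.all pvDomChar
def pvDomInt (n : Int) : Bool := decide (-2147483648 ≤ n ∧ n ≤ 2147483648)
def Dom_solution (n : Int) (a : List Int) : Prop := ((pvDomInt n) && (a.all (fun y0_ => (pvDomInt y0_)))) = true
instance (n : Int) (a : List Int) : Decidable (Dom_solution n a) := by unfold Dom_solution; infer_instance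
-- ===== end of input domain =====

-- B replaces A's three boundary branches with in-place accumulation by a prefix-sum table
-- and uniform range-difference lookups (objective: simpler; equivalence is about the return value).

-- ===== PORT A =====
-- body of A's for-loop over enumerate(a): branches in Python order, indexing via pyGetD/pySetD
def pvStepA (a : List Int) (r : List Int) (p : Int × Int) : List Int :=
  let idx := p.1
  let m : Int := a.length
  if 0 < idx ∧ idx < m - 1 then
    PySem.List.pySetD r idx (PySem.List.pyGetD r idx 0 +
      (PySem.List.pyGetD a (idx - 1) 0 + PySem.List.pyGetD a idx 0 + PySem.List.pyGetD a (idx + 1) 0))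
  else if idx = m - 1 then
    PySem.List.pySetD r idx (PySem.List.pyGetD a idx 0 + PySem.List.pyGetD a (idx - 1) 0)
  else
    PySem.List.pySetD r idx (PySem.List.pyGetD a (idx + 1) 0 + PySem.List.pyGetD a idx 0)

def solution (n : Int) (a : List Int) : List Int :=
  let result : List Int := (List.range a.length).map (fun _ => (0 : Int))
  if (a.length : Int) = 1 then a
  else
    (PySem.List.enumerate a 0).foldl (pvStepA a)
      (if (a.length : Int) = 2 then
        PySem.List.pySetD
          (PySem.List.pySetD result 0 (PySem.List.pyGetD a 0 0 + PySem.List.pyGetD a 1 0))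
          1 (PySem.List.pyGetD a 0 0 + PySem.List.pyGetD a 1 0)
      else result)

-- ===== PORT B =====
-- prefix = [0]; for x in a: total += x; prefix.append(total)  — folded over the pair (prefix, total);
-- then the comprehension.  Nat subtraction i - 1 clamps at 0 exactly like Python's max(i-1, 0).
def solution_alt (n : Int) (a : List Int) : List Int :=
  let pt := a.foldl (fun (s : List Int × Int) x => (s.1 ++ [s.2 + x], s.2 + x)) ([0], 0)
  let pre := pt.1
  let m := a.length
  (List.range m).map (fun i => pre.getD (min (i + 2) m) 0 - pre.getD (max (i - 1) 0) 0)

-- ===== PRECONDITION & SPEC =====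
def Spec_solution (n : Int) (a : List Int) (out : List Int) : Prop := out = solution_alt n a
instance (n : Int) (a : List Int) (out : List Int) : Decidable (Spec_solution n a out) := by unfold Spec_solution; infer_instance

-- ===== CLAIM (what is proved, stated in full; the proofs are below) =====
def Claim_equal_solution : Prop := ∀ (n : Int) (a : List Int), Dom_solution n a → Spec_solution n a (solution n a)

-- ===== LEMMAS AND PROOFS =====

-- the clamped neighbour-window value both programs compute at index i
def pvW (a : List Int) (i : Nat) : Int :=
  (if 1 ≤ i then a.getD (i - 1) 0 else 0) + a.getD i 0 + a.getD (i + 1) 0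

-- running-total list produced by B's loop
def pvScan : List Int → Int → List Int
  | [], _ => []
  | x :: xs, t => (t + x) :: pvScan xs (t + x)

def pvT (a : List Int) (k : Nat) : Int := (a.take k).sum

lemma pvFoldB (a : List Int) : ∀ (p : List Int) (t : Int),
    a.foldl (fun (s : List Int × Int) x => (s.1 ++ [s.2 + x], s.2 + x)) (p, t)
      = (p ++ pvScan a t, t + a.sum) := by
  induction a with
  | nil => intro p t; simp [pvScan]
  | cons x xs ih =>
    intro p t
    rw [List.foldl_cons, ih]
    simp only [pvScan, List.sum_cons, List.append_assoc, List.singleton_append, Prod.mk.injEq]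
    refine ⟨by simp, by ring⟩

lemma pvScan_getD (a : List Int) : ∀ (t : Int) (k : Nat), k < a.length →
    (pvScan a t).getD k 0 = t + (a.take (k + 1)).sum := by
  induction a with
  | nil => intro t k hk; simp at hk
  | cons x xs ih =>
    intro t k hk
    cases k with
    | zero => simp [pvScan]
    | succ k =>
      show (pvScan (x :: xs) t).getD (k + 1) 0 = _
      rw [show pvScan (x :: xs) t = (t + x) :: pvScan xs (t + x) from rfl,
        List.getD_cons_succ, ih (t + x) k (by simpa using hk),
        List.take_succ_cons, List.sum_cons]
      ring

lemma pvPrefix_getD (a : List Int) (k : Nat) (hk : k ≤ a.length) :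
    ((0 : Int) :: pvScan a 0).getD k 0 = pvT a k := by
  cases k with
  | zero => simp [pvT]
  | succ k =>
    rw [List.getD_cons_succ, pvScan_getD a 0 k (by omega)]
    simp [pvT]

lemma pvT_succ (a : List Int) (k : Nat) (hk : k < a.length) :
    pvT a (k + 1) = pvT a k + a.getD k 0 := by
  unfold pvT
  rw [List.take_succ_eq_append_getElem hk, List.sum_append, List.getD_eq_getElem _ _ hk]
  simp

lemma pvGetD_past (a : List Int) (k : Nat) (h : a.length ≤ k) : a.getD k 0 = 0 := by
  simp [List.getD_eq_getElem?_getD, List.getElem?_eq_none (by omega : a.length ≤ k)]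

lemma pvB_point (a : List Int) (i : Nat) (h : i < a.length) :
    pvT a (min (i + 2) a.length) - pvT a (max (i - 1) 0) = pvW a i := by
  have hmax : max (i - 1) 0 = i - 1 := by omega
  rw [hmax]
  cases i with
  | zero =>
    simp only [pvW, Nat.zero_sub, if_neg (by omega : ¬ (1:Nat) ≤ 0)]
    by_cases h2 : 2 ≤ a.length
    · have hmin : min 2 a.length = 2 := by omega
      rw [show (0+2 : Nat) = 2 from rfl, hmin, pvT_succ a 1 (by omega), pvT_succ a 0 (by omega)]
      simp [pvT]
    · have hmin : min 2 a.length = 1 := by omega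
      rw [show (0+2 : Nat) = 2 from rfl, hmin, pvT_succ a 0 (by omega),
        show a.getD (0+1) 0 = 0 from pvGetD_past a 1 (by omega)]
      simp [pvT]
  | succ j =>
    simp only [Nat.succ_sub_one]
    by_cases hc : j + 3 ≤ a.length
    · have hmin : min (j + 1 + 2) a.length = j + 3 := by omega
      rw [hmin, show j + 3 = (j+2)+1 from rfl, pvT_succ a (j+2) (by omega),
        pvT_succ a (j+1) (by omega), pvT_succ a j (by omega)]
      simp only [pvW, if_pos (by omega : 1 ≤ j + 1), Nat.add_sub_cancel]
      ring
    · have hmin : min (j + 1 + 2) a.length = j + 2 := by omega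
      rw [hmin, show j + 2 = (j+1)+1 from rfl, pvT_succ a (j+1) (by omega),
        pvT_succ a j (by omega)]
      simp only [pvW, if_pos (by omega : 1 ≤ j + 1), Nat.add_sub_cancel,
        pvGetD_past a (j + 1 + 1) (by omega)]
      ring

lemma pvAltEq (n : Int) (a : List Int) :
    solution_alt n a = (List.range a.length).map (pvW a) := by
  unfold solution_alt
  rw [pvFoldB a [0] 0]
  apply List.map_congr_left
  intro i hi
  have hi' : i < a.length := List.mem_range.mp hi
  show ((0 : Int) :: pvScan a 0).getD (min (i + 2) a.length) 0
      - ((0 : Int) :: pvScan a 0).getD (max (i - 1) 0) 0 = pvW a i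
  rw [pvPrefix_getD a _ (by omega), pvPrefix_getD a _ (by omega)]
  exact pvB_point a i hi'

-- zero-initialised result list
lemma pvZeros_getD (m j : Nat) : ((List.range m).map (fun _ => (0:Int))).getD j 0 = 0 := by
  by_cases hj : j < m
  · simp [List.getD_eq_getElem?_getD]
  · exact pvGetD_past _ _ (by simpa using (by omega : m ≤ j))

lemma pvStepA_eval (a r : List Int) (idx x : Int) :
    pvStepA a r (idx, x) =
      if 0 < idx ∧ idx < (a.length : Int) - 1 then
        PySem.List.pySetD r idx (PySem.List.pyGetD r idx 0 +
          (PySem.List.pyGetD a (idx - 1) 0 + PySem.List.pyGetD a idx 0 + PySem.List.pyGetD a (idx + 1) 0))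
      else if idx = (a.length : Int) - 1 then
        PySem.List.pySetD r idx (PySem.List.pyGetD a idx 0 + PySem.List.pyGetD a (idx - 1) 0)
      else
        PySem.List.pySetD r idx (PySem.List.pyGetD a (idx + 1) 0 + PySem.List.pyGetD a idx 0) := rfl

-- A's loop, processed up to index K, equals the first K window values followed by untouched state
lemma pvFoldA (a : List Int) (hm : a.length ≠ 1) (r : List Int)
    (hlen : r.length = a.length)
    (hz : ∀ j : Nat, 0 < j → j + 1 < a.length → r.getD j 0 = 0) :
    ∀ K : Nat, K ≤ a.length →
    (PySem.List.pyRange 0 (K : Int) 1).foldl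
        (fun s (j : Int) => pvStepA a s (j, PySem.List.pyGetD a j 0)) r
      = ((List.range a.length).map (pvW a)).take K ++ r.drop K := by
  intro K
  induction K with
  | zero => intro _; simp [PySem.List.pyRange]
  | succ K ih =>
    intro hK
    have hKlt : K < a.length := by omega
    have hrange : PySem.List.pyRange 0 ((K + 1 : Nat) : Int) 1
        = PySem.List.pyRange 0 (K : Int) 1 ++ [(K : Int)] := by
      push_cast
      exact PySem.List.pyRange_one_succ_right (by exact_mod_cast Nat.zero_le K)
    rw [hrange, List.foldl_append, ih (by omega)]
    set W := (List.range a.length).map (pvW a) with hWdef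
    have hWlen : W.length = a.length := by simp [hWdef]
    have hTlen : (W.take K).length = K := by simp [hWlen]; omega
    have hWK : W[K]'(by omega) = pvW a K := by simp [hWdef]
    -- reading index K of the intermediate state gives the untouched r value
    have hTK : (W.take K ++ r.drop K).getD K 0 = r.getD K 0 := by
      rw [List.getD_append_right (W.take K) (r.drop K) 0 K (by omega), hTlen, Nat.sub_self]
      simp [List.getD_eq_getElem?_getD, List.getElem?_drop]
    -- setting index K of the intermediate state
    have hset : ∀ v : Int, (W.take K ++ r.drop K).set K v = W.take K ++ (v :: r.drop (K + 1)) := by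
      intro v
      rw [List.set_append_right K v (show (W.take K).length ≤ K by omega), hTlen, Nat.sub_self,
        List.drop_eq_getElem_cons (show K < r.length by omega)]
      rfl
    have hRHS : W.take (K + 1) ++ r.drop (K + 1)
        = W.take K ++ (pvW a K :: r.drop (K + 1)) := by
      rw [List.take_succ_eq_append_getElem (by omega : K < W.length), hWK]
      simp
    rw [hRHS]
    -- now evaluate the step at index K
    show pvStepA a (W.take K ++ r.drop K) ((K : Int), PySem.List.pyGetD a (K : Int) 0)
        = W.take K ++ (pvW a K :: r.drop (K + 1))
    rw [pvStepA_eval]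
    by_cases hb1 : 0 < K ∧ K + 1 < a.length
    · rw [if_pos (by constructor <;> [exact_mod_cast hb1.1; omega])]
      have hc1 : ((K : Int) - 1) = ((K - 1 : Nat) : Int) := by omega
      have hc2 : ((K : Int) + 1) = ((K + 1 : Nat) : Int) := by push_cast; ring
      rw [hc1, hc2]
      simp only [PySem.List.pySetD_natCast, PySem.List.pyGetD_natCast]
      rw [hset, hTK, hz K hb1.1 hb1.2]
      have : (0 : Int) + (a.getD (K - 1) 0 + a.getD K 0 + a.getD (K + 1) 0) = pvW a K := by
        simp only [pvW, if_pos (by omega : 1 ≤ K)]; ring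
      rw [this]
    · rw [if_neg (by
        intro ⟨c1, c2⟩
        exact hb1 ⟨by exact_mod_cast c1, by omega⟩)]
      by_cases hb2 : K = a.length - 1
      · -- last index: K = len - 1 and (since ¬interior and K < len) len ≥ 2, K ≥ 1
        have hK1 : 1 ≤ K := by omega
        rw [if_pos (by omega : (K : Int) = (a.length : Int) - 1)]
        have hc1 : ((K : Int) - 1) = ((K - 1 : Nat) : Int) := by omega
        rw [hc1]
        simp only [PySem.List.pySetD_natCast, PySem.List.pyGetD_natCast]
        rw [hset]
        have : a.getD K 0 + a.getD (K - 1) 0 = pvW a K := by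
          simp only [pvW, if_pos hK1, pvGetD_past a (K + 1) (by omega)]
          ring
        rw [this]
      · -- first index: K = 0 and len ≥ 2
        have hK0 : K = 0 := by omega
        have hlen2 : 2 ≤ a.length := by omega
        rw [if_neg (by omega : ¬ (K : Int) = (a.length : Int) - 1)]
        have hc2 : ((K : Int) + 1) = ((K + 1 : Nat) : Int) := by push_cast; ring
        rw [hc2]
        simp only [PySem.List.pySetD_natCast, PySem.List.pyGetD_natCast]
        rw [hset]
        have : a.getD (K + 1) 0 + a.getD K 0 = pvW a K := by
          simp only [pvW, hK0, if_neg (by omega : ¬ (1:Nat) ≤ 0)]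
          ring
        rw [this]

lemma pvAEq (n : Int) (a : List Int) :
    solution n a = (List.range a.length).map (pvW a) := by
  unfold solution
  by_cases h1 : a.length = 1
  · rw [if_pos (by exact_mod_cast h1)]
    obtain ⟨x, hx⟩ : ∃ x, a = [x] := by
      cases a with
      | nil => simp at h1
      | cons y ys => cases ys with
        | nil => exact ⟨y, rfl⟩
        | cons z zs => simp at h1
    subst hx
    simp [pvW, List.range_succ]
  · rw [if_neg (by exact_mod_cast h1)]
    rw [PySem.List.enumerate_eq_map_pyRange a 0,
      show PySem.List.len a = ((a.length : Nat) : Int) from rfl]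
    simp only [List.foldl_map]
    by_cases h2 : a.length = 2
    · rw [if_pos (by exact_mod_cast h2)]
      obtain ⟨x, y, rfl⟩ : ∃ x y, a = [x, y] := by
        match a, h2 with
        | [x, y], _ => exact ⟨x, y, rfl⟩
      norm_num [pvStepA_eval, pvW, pysem, List.range_succ]
      ring
    · rw [if_neg (by exact_mod_cast h2)]
      have := pvFoldA a h1 ((List.range a.length).map (fun _ => (0:Int)))
        (by simp) (by intro j _ _; exact pvZeros_getD _ _) a.length (le_refl _)
      rw [this]
      simp

-- ===== VERDICT (by name: the statement is the Claim_ definition above) =====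
theorem solution_spec : Claim_equal_solution := by
  intro n a _
  unfold Spec_solution
  rw [pvAEq, pvAltEq]
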